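-- pv_equiv track=rewrite | github.com/dagoaty/adventofcode2025 | day3/solution.py | find_max_two_digit
-- ===== SOURCE A (Python) =====
-- def find_max_two_digit(line):
--     """
--     Find the highest two-digit number that can be formed from a line of digits.
--
--     Numbers are formed by selecting two digits where the first comes before
--     the second in position (but they don't need to be adjacent).
--
--     Args:
--         line: String of digits
--
--     Returns:
--         Integer representing the highest two-digit number possible
--     """
--     line = line.strip()
--
--     if len(line) < 2:
--         return 0
--
--     max_value = 0
--     max_right = int(line[-1])
--
--     # Scan from right to left, tracking the maximum digit to the right
--     for i in range(len(line) - 2, -1, -1):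
--         digit = int(line[i])
--         # Form two-digit number with current digit and best digit to the right
--         value = digit * 10 + max_right
--         max_value = max(max_value, value)
--         # Update the maximum digit seen so far
--         max_right = max(max_right, digit)
--
--     return max_value
-- ===== SOURCE B (Python) =====
-- def find_max_two_digit(line):
--     s = line.strip()
--     if len(s) < 2:
--         return 0
--     digits = [int(c) for c in s]
--     tens = max(digits[:-1])
--     i0 = digits.index(tens)
--     units = max(digits[i0 + 1:])
--     return tens * 10 + units
-- ===== Notes on version B (the rewrite author's own statement) =====
-- stated objective: simpler
-- what changed: Replaces A's right-to-left scan with a running (best value, max digit to the right) state pair by a direct greedy place-value selection: take the maximum digit over all but the last position as the tens digit, find its first occurrence, and take the maximum digit after that occurrence as the units digit.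
import Mathlib
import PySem

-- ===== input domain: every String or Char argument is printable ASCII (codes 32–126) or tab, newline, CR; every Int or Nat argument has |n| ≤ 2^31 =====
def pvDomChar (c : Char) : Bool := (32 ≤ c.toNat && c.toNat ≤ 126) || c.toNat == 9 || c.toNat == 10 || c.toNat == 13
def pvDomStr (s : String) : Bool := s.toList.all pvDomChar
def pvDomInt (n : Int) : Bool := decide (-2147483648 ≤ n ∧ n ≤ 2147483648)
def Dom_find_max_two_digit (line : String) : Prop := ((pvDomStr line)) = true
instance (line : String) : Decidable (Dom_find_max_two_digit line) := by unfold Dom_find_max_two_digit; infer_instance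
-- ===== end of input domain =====

-- B replaces A's right-to-left scan with a running state pair by a direct greedy
-- place-value selection (max tens digit at its first occurrence, then max units digit
-- after it); objective: simpler.

-- int(c) for a one-character string c (both Pythons call it; ValueError = none, excluded by Pre_)
def pyDigit (c : Char) : Int := (PySem.Int.ofChars? [c]).getD 0

-- ===== PORT A =====
def find_max_two_digit (line : String) : Int :=
  let cs := PySem.Chars.strip line.toList
  if PySem.List.len cs < 2 then 0
  else
    let maxRight := pyDigit (PySem.List.pyGetD cs (-1) ' ')
    let r := (PySem.List.pyRange (PySem.List.len cs - 2) (-1) (-1)).foldl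
      (fun (st : Int × Int) i =>
        let d := pyDigit (PySem.List.pyGetD cs i ' ')
        (max st.1 (d * 10 + st.2), max st.2 d)) (0, maxRight)
    r.1

-- ===== PORT B =====
def find_max_two_digit_alt (line : String) : Int :=
  let s := PySem.Chars.strip line.toList
  if PySem.List.len s < 2 then 0
  else
    let digits := s.map pyDigit
    let tens := (PySem.List.max? (PySem.List.slice digits none (some (-1))) (fun x => x)).getD 0
    let i0 := (PySem.List.index? digits tens).getD 0
    let units := (PySem.List.max? (PySem.List.slice digits (some ((i0 : Int) + 1)) none) (fun x => x)).getD 0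
    tens * 10 + units

-- ===== PRECONDITION & SPEC =====
-- Pre_ excludes exactly the inputs where Python's int(c) raises ValueError: a stripped
-- line of length ≥ 2 containing a non-digit character.
def Pre_find_max_two_digit (line : String) : Prop :=
  (PySem.Chars.strip line.toList).length < 2 ∨
    (PySem.Chars.strip line.toList).all (fun c => 48 ≤ c.toNat && c.toNat ≤ 57) = true
instance (line : String) : Decidable (Pre_find_max_two_digit line) := by
  unfold Pre_find_max_two_digit; infer_instance

def pvWitness_find_max_two_digit : String := "93"

def Spec_find_max_two_digit (line : String) (out : Int) : Prop := out = find_max_two_digit_alt line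
instance (line : String) (out : Int) : Decidable (Spec_find_max_two_digit line out) := by
  unfold Spec_find_max_two_digit; infer_instance

-- ===== CLAIM (what is proved, stated in full; the proofs are below) =====
def Claim_equal_find_max_two_digit : Prop := ∀ (line : String), Dom_find_max_two_digit line → Pre_find_max_two_digit line → Spec_find_max_two_digit line (find_max_two_digit line)

-- ===== LEMMAS AND PROOFS =====

-- int of a single digit character
theorem digit_char_eval (c : Char) (h1 : 48 ≤ c.toNat) (h2 : c.toNat ≤ 57) :
    PySem.Int.ofChars? [c] = some ((c.toNat : Int) - 48) := by
  interval_cases h : c.toNat <;> rw [← Char.ofNat_toNat c, h] <;> decide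

theorem pyDigit_bounds (c : Char) (h1 : 48 ≤ c.toNat) (h2 : c.toNat ≤ 57) :
    0 ≤ pyDigit c ∧ pyDigit c ≤ 9 := by
  simp [pyDigit, digit_char_eval c h1 h2]; omega

-- max of xs ++ [l]
def maxFrom (l : Int) (xs : List Int) : Int := xs.foldr max l

-- B's units value: max of what follows the first occurrence of T, then l
def findU (T : Int) : List Int → Int → Int
  | [], l => l
  | d :: rest, l => if d = T then maxFrom l rest else findU T rest l

-- A's loop as a foldr over the digit values of all positions but the last
def fmR (xs : List Int) (l : Int) : Int × Int :=
  xs.foldr (fun d st => (max st.1 (d * 10 + st.2), max st.2 d)) (0, l)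

theorem foldr_max_pull (l : List Int) (a b : Int) :
    l.foldr max (max a b) = max a (l.foldr max b) := by
  induction l with
  | nil => rfl
  | cons c t ih => simp [List.foldr, ih]; omega

theorem foldl_max_eq_foldr (l : List Int) (a : Int) :
    l.foldl max a = l.foldr max a := by
  induction l generalizing a with
  | nil => rfl
  | cons c t ih =>
    simp only [List.foldl, List.foldr, ih]
    rw [max_comm a c, foldr_max_pull]

theorem max?_append_singleton (xs : List Int) (l : Int) :
    PySem.List.max? (xs ++ [l]) (fun x => x) = some (maxFrom l xs) := by
  cases xs with
  | nil => simp [PySem.List.max?_id_cons, maxFrom]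
  | cons x t =>
    rw [List.cons_append, PySem.List.max?_id_cons]
    simp only [maxFrom, List.foldr]
    rw [foldl_max_eq_foldr, List.foldr_append]
    simp only [List.foldr]
    rw [max_comm l x, foldr_max_pull]

theorem maxFrom_nonneg (xs : List Int) (l : Int) (hl : 0 ≤ l) : 0 ≤ maxFrom l xs := by
  induction xs with
  | nil => exact hl
  | cons d t ih => simp [maxFrom, List.foldr] at *; omega

theorem maxFrom_le9 (xs : List Int) (l : Int) (hl : l ≤ 9)
    (hx : ∀ d ∈ xs, d ≤ 9) : maxFrom l xs ≤ 9 := by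
  induction xs with
  | nil => exact hl
  | cons d t ih =>
    have hd := hx d (by simp)
    have := ih (fun d hd => hx d (by simp [hd]))
    simp [maxFrom, List.foldr] at *; omega

theorem findU_nonneg (T : Int) (xs : List Int) (l : Int) (hl : 0 ≤ l) :
    0 ≤ findU T xs l := by
  induction xs with
  | nil => exact hl
  | cons d t ih =>
    by_cases h : d = T <;> simp [findU, h, ih, maxFrom_nonneg _ _ hl]

theorem findU_le_maxFrom (T : Int) (xs : List Int) (l : Int) :
    findU T xs l ≤ maxFrom l xs := by
  induction xs with
  | nil => simp [findU, maxFrom]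
  | cons d t ih =>
    by_cases h : d = T <;>
      simp [findU, h, maxFrom, List.foldr] at * <;> omega

theorem fmR_snd (xs : List Int) (l : Int) : (fmR xs l).2 = maxFrom l xs := by
  induction xs with
  | nil => rfl
  | cons d t ih => simp [fmR, maxFrom, List.foldr] at *; omega

-- core equivalence: A's reverse scan equals greedy place-value selection
theorem fmR_eq_greedy (xs : List Int) (l : Int) (hne : xs ≠ [])
    (hx : ∀ d ∈ xs, 0 ≤ d ∧ d ≤ 9) (hl0 : 0 ≤ l) (hl9 : l ≤ 9) :
    (fmR xs l).1 = 10 * (xs.foldr max 0) + findU (xs.foldr max 0) xs l := by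
  induction xs with
  | nil => exact absurd rfl hne
  | cons d fr ih =>
    have hd := hx d (by simp)
    cases fr with
    | nil =>
      simp [fmR, findU, maxFrom, List.foldr]
      omega
    | cons f2 ft =>
      have hfr : ∀ x ∈ f2 :: ft, 0 ≤ x ∧ x ≤ 9 := fun x hx' => hx x (by simp [hx'])
      have hih := ih (by simp) hfr
      have hT'0 : 0 ≤ (f2 :: ft).foldr max 0 := by
        simpa [maxFrom] using maxFrom_nonneg (f2 :: ft) 0 le_rfl
      have hT'9 : (f2 :: ft).foldr max 0 ≤ 9 := by
        simpa [maxFrom] using maxFrom_le9 (f2 :: ft) 0 (by omega) (fun x hx' => (hfr x hx').2)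
      have hgoal1 : (fmR (d :: f2 :: ft) l).1 =
          max (fmR (f2 :: ft) l).1 (d * 10 + (fmR (f2 :: ft) l).2) := rfl
      have hsnd := fmR_snd (f2 :: ft) l
      have hfle := findU_le_maxFrom ((f2 :: ft).foldr max 0) (f2 :: ft) l
      have hf0 := findU_nonneg ((f2 :: ft).foldr max 0) (f2 :: ft) l hl0
      have hm9 : maxFrom l (f2 :: ft) ≤ 9 := maxFrom_le9 _ l hl9 (fun x hx' => (hfr x hx').2)
      rw [hgoal1, hih, hsnd]
      by_cases hcase : (f2 :: ft).foldr max 0 ≤ d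
      · -- new maximum at the head: tens digit is d, first occurrence at position 0
        have hmax : (d :: f2 :: ft).foldr max 0 = d := by rw [List.foldr_cons]; omega
        rw [hmax]
        have hfind : findU d (d :: f2 :: ft) l = maxFrom l (f2 :: ft) := by
          simp [findU]
        rw [hfind]; omega
      · -- head is smaller: tens digit and its first occurrence are in the tail
        have hdT : d ≠ (f2 :: ft).foldr max 0 := by omega
        have hmax : (d :: f2 :: ft).foldr max 0 = (f2 :: ft).foldr max 0 := by
          rw [List.foldr_cons]; omega
        rw [hmax]
        have hfind : findU ((f2 :: ft).foldr max 0) (d :: f2 :: ft) l =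
            findU ((f2 :: ft).foldr max 0) (f2 :: ft) l := by
          simp only [findU]; rw [if_neg hdT]
        rw [hfind]; omega

-- B's index/slice/max chain computes findU
theorem units_chain (xs : List Int) (T l : Int) (hT : T ∈ xs) :
    ∃ k, PySem.List.index? xs T = some k ∧ k < xs.length ∧
      (PySem.List.max? (xs.drop (k + 1) ++ [l]) (fun x => x)).getD 0 = findU T xs l := by
  induction xs with
  | nil => simp at hT
  | cons d rest ih =>
    by_cases h : d = T
    · subst h
      exact ⟨0, PySem.List.index?_cons_self _ _, by simp,
        by simp [max?_append_singleton, findU]⟩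
    · have hTr : T ∈ rest := by
        cases hT with
        | head => exact absurd rfl h
        | tail _ h' => exact h'
      obtain ⟨k, hk, hkl, hu⟩ := ih hTr
      refine ⟨k + 1, ?_, by simpa using hkl, ?_⟩
      · rw [PySem.List.index?_cons_of_ne _ h, hk]; rfl
      · simpa [findU, h] using hu

-- index-style foldr over range m equals foldr over take m
theorem foldr_range_getD {α β : Type} (xs : List α) (dflt : α) (g : α → β → β) :
    ∀ m, m ≤ xs.length → ∀ init,
      List.foldr (fun (j : Nat) st => g (xs.getD j dflt) st) init (List.range m) =
        List.foldr g init (xs.take m) := by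
  intro m
  induction m with
  | zero => intro _ init; simp
  | succ m ih =>
    intro hm init
    have hmlt : m < xs.length := by omega
    rw [List.range_succ, List.foldr_append, List.take_succ]
    simp only [List.foldr, List.getElem?_eq_getElem hmlt, Option.toList_some]
    rw [List.foldr_append, ih (by omega)]
    simp [List.foldr, List.getElem?_eq_getElem hmlt]

-- A's loop rewritten as fmR over the digit values of all but the last character
theorem a_side (front : List Char) (lastc : Char) (hfl : 1 ≤ front.length) :
    ((PySem.List.pyRange (PySem.List.len (front ++ [lastc]) - 2) (-1) (-1)).foldl
      (fun (st : Int × Int) i =>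
        (max st.1 (pyDigit (PySem.List.pyGetD (front ++ [lastc]) i ' ') * 10 + st.2),
         max st.2 (pyDigit (PySem.List.pyGetD (front ++ [lastc]) i ' '))))
      (0, pyDigit (PySem.List.pyGetD (front ++ [lastc]) (-1) ' '))) =
    fmR (front.map pyDigit) (pyDigit lastc) := by
  have hlen : PySem.List.len (front ++ [lastc]) - 2 = ((front.length - 1 : Nat) : Int) := by
    simp [PySem.List.len_eq]; omega
  rw [hlen, PySem.List.pyGetD_neg_one_append_singleton,
      PySem.List.pyRange_neg_one_eq_reverse, List.foldl_reverse,
      show ((-1 : Int) + 1) = 0 from by norm_num]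
  have hrng : PySem.List.pyRange 0 (((front.length - 1 : Nat) : Int) + 1) 1 =
      (List.range front.length).map (fun (k : Nat) => (k : Int)) := by
    rw [show (((front.length - 1 : Nat) : Int) + 1) = (front.length : Int) by omega,
        PySem.List.pyRange_one]
    simp
  rw [hrng, List.foldr_map]
  have hbody : ∀ (j : Nat) (st : Int × Int),
      (max st.1 (pyDigit (PySem.List.pyGetD (front ++ [lastc]) (j : Int) ' ') * 10 + st.2),
       max st.2 (pyDigit (PySem.List.pyGetD (front ++ [lastc]) (j : Int) ' '))) =
      (fun c (st : Int × Int) =>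
        (max st.1 (pyDigit c * 10 + st.2), max st.2 (pyDigit c)))
        ((front ++ [lastc]).getD j ' ') st := by
    intro j st
    rw [PySem.List.pyGetD_natCast]
  calc List.foldr
        (fun (j : Nat) (st : Int × Int) =>
          (max st.1 (pyDigit (PySem.List.pyGetD (front ++ [lastc]) (j : Int) ' ') * 10 + st.2),
           max st.2 (pyDigit (PySem.List.pyGetD (front ++ [lastc]) (j : Int) ' '))))
        (0, pyDigit lastc) (List.range front.length)
      = List.foldr
          (fun (j : Nat) (st : Int × Int) =>
            (fun c (st : Int × Int) =>
              (max st.1 (pyDigit c * 10 + st.2), max st.2 (pyDigit c)))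
              ((front ++ [lastc]).getD j ' ') st)
          (0, pyDigit lastc) (List.range front.length) := by
        congr 1
        funext j st
        exact hbody j st
    _ = List.foldr
          (fun c (st : Int × Int) =>
            (max st.1 (pyDigit c * 10 + st.2), max st.2 (pyDigit c)))
          (0, pyDigit lastc) ((front ++ [lastc]).take front.length) := by
        exact foldr_range_getD (front ++ [lastc]) ' '
          (fun c (st : Int × Int) =>
            (max st.1 (pyDigit c * 10 + st.2), max st.2 (pyDigit c)))
          front.length (by simp) _
    _ = List.foldr
          (fun c (st : Int × Int) =>
            (max st.1 (pyDigit c * 10 + st.2), max st.2 (pyDigit c)))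
          (0, pyDigit lastc) front := by
        rw [List.take_left]
    _ = fmR (front.map pyDigit) (pyDigit lastc) := by
        rw [fmR, List.foldr_map]

-- B's chain rewritten as greedy selection over the digit values
theorem foldl_max_eq_foldr_zero (f0 : Int) (frest : List Int) (h : 0 ≤ f0) :
    frest.foldl max f0 = (f0 :: frest).foldr max 0 := by
  rw [foldl_max_eq_foldr, List.foldr_cons]
  have h1 := foldr_max_pull frest f0 0
  simp only [show max f0 0 = f0 by omega] at h1
  omega

theorem b_side (front : List Char) (lastc : Char) (hfl : 1 ≤ front.length)
    (hdig : ∀ c ∈ front ++ [lastc], 48 ≤ c.toNat ∧ c.toNat ≤ 57) :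
    ((PySem.List.max? (PySem.List.slice ((front ++ [lastc]).map pyDigit) none (some (-1)))
        (fun x => x)).getD 0) * 10 +
      (PySem.List.max? (PySem.List.slice ((front ++ [lastc]).map pyDigit)
        (some ((((PySem.List.index? ((front ++ [lastc]).map pyDigit)
          ((PySem.List.max? (PySem.List.slice ((front ++ [lastc]).map pyDigit) none (some (-1)))
            (fun x => x)).getD 0)).getD 0 : Nat) : Int) + 1)) none) (fun x => x)).getD 0 =
    10 * ((front.map pyDigit).foldr max 0) +
      findU ((front.map pyDigit).foldr max 0) (front.map pyDigit) (pyDigit lastc) := by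
  have hmap : (front ++ [lastc]).map pyDigit = front.map pyDigit ++ [pyDigit lastc] := by
    simp
  cases hf : front.map pyDigit with
  | nil =>
    rw [List.map_eq_nil_iff] at hf
    rw [hf] at hfl; simp at hfl
  | cons f0 frest =>
    have hf0 : 0 ≤ f0 := by
      have : f0 ∈ front.map pyDigit := by rw [hf]; simp
      obtain ⟨c, hc, hcf⟩ := List.mem_map.mp this
      have := pyDigit_bounds c (hdig c (by simp [hc])).1 (hdig c (by simp [hc])).2
      omega
    have htens : (PySem.List.max? (PySem.List.slice ((front ++ [lastc]).map pyDigit)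
        none (some (-1))) (fun x => x)).getD 0 = (front.map pyDigit).foldr max 0 := by
      rw [hmap, PySem.List.slice_to_neg_one, List.dropLast_concat, hf,
          PySem.List.max?_id_cons]
      simp only [Option.getD_some]
      exact foldl_max_eq_foldr_zero f0 frest hf0
    have hTmem : (front.map pyDigit).foldr max 0 ∈ front.map pyDigit := by
      have hfold := foldl_max_eq_foldr_zero f0 frest hf0
      rw [hf, ← hfold]
      rcases PySem.List.foldl_max_mem frest f0 with h | h
      · rw [h]; simp
      · simp [h]
    obtain ⟨k, hk, hkl, hu⟩ :=
      units_chain (front.map pyDigit) ((front.map pyDigit).foldr max 0) (pyDigit lastc) hTmem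
    rw [htens, hmap, PySem.List.index?_append_of_mem _ hTmem, hk]
    simp only [Option.getD_some]
    rw [PySem.List.slice_from _ (by omega : (0:Int) ≤ (k : Int) + 1),
        show ((k : Int) + 1).toNat = k + 1 by omega,
        List.drop_append_of_le_length (by omega), hu]
    rw [hf]
    omega

-- ===== VERDICT (by name: the statement is the Claim_ definition above) =====
theorem find_max_two_digit_spec : Claim_equal_find_max_two_digit := by
  intro line _ hpre
  unfold Spec_find_max_two_digit find_max_two_digit find_max_two_digit_alt
  by_cases hlen : PySem.List.len (PySem.Chars.strip line.toList) < 2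
  · have h1 : (PySem.Chars.strip line.toList).length ≤ 1 := by
      simp [PySem.List.len_eq] at hlen; omega
    simp [h1]
  · simp only [if_neg hlen]
    have hdig : ∀ c ∈ PySem.Chars.strip line.toList, 48 ≤ c.toNat ∧ c.toNat ≤ 57 := by
      rcases hpre with h | h
      · exfalso; simp [PySem.List.len_eq] at hlen; omega
      · intro c hc
        have := List.all_eq_true.mp h c hc
        simp only [Bool.and_eq_true, decide_eq_true_eq] at this
        exact this
    have hn2 : 2 ≤ (PySem.Chars.strip line.toList).length := by
      simp [PySem.List.len_eq] at hlen; omega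
    have hcsne : PySem.Chars.strip line.toList ≠ [] := by
      intro h; rw [h] at hn2; simp at hn2
    obtain ⟨front, lastc, hsplit⟩ :
        ∃ front lastc, PySem.Chars.strip line.toList = front ++ [lastc] :=
      ⟨_, _, (List.dropLast_append_getLast hcsne).symm⟩
    rw [hsplit] at hdig hn2 ⊢
    have hfl : 1 ≤ front.length := by simp at hn2; omega
    have hfdig : ∀ d ∈ front.map pyDigit, 0 ≤ d ∧ d ≤ 9 := by
      intro d hd
      obtain ⟨c, hc, hcf⟩ := List.mem_map.mp hd
      have := pyDigit_bounds c (hdig c (by simp [hc])).1 (hdig c (by simp [hc])).2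
      omega
    have hlb := pyDigit_bounds lastc (hdig lastc (by simp)).1 (hdig lastc (by simp)).2
    have hfne : front.map pyDigit ≠ [] := by
      intro h; rw [List.map_eq_nil_iff] at h; rw [h] at hfl; simp at hfl
    rw [a_side front lastc hfl,
        fmR_eq_greedy (front.map pyDigit) (pyDigit lastc) hfne hfdig hlb.1 hlb.2,
        b_side front lastc hfl hdig]
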